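-- pv_equiv track=rewrite | github.com/zjuer-dm/Undergraduate-Graduation-Project | ros_inference/vlnce_baselines/common/utils.py | split_list_by_pattern
-- ===== SOURCE A (Python) =====
-- def split_list_by_pattern(input_list, pattern=[102, 101]):
--     """
--     将整数列表按指定模式进行切分。
--     不会改变输入的list
--
--     Args:
--         input_list (list): 原始的整数列表。
--         pattern (list): 用于切分的子片段，默认为 [102, 101]。
--
--     Returns:
--         list: 切分后的列表（由多个列表组成）。
--     """
--     result = []
--     temp = []
--     pattern_len = len(pattern)
--
--     for i in range(len(input_list)):
--         temp.append(input_list[i])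
--         # 检查当前位置是否匹配模式
--         if input_list[i:i + pattern_len] == pattern:
--             # 如果匹配，将当前片段加入结果并清空临时列表
--             if temp:
--                 result.append(temp)
--             temp = []
--
--     # 添加最后一个片段（如果有）
--     if temp:
--         result.append(temp)
--
--     return result
-- ===== SOURCE B (Python) =====
-- def split_list_by_pattern(input_list, pattern=[102, 101]):
--     """Two-pass re-implementation: first collect the cut points (one past each
--     match start), then carve the segments out by slicing; drops an empty tail."""
--     n = len(input_list)
--     m = len(pattern)
--     cuts = [i + 1 for i in range(n) if input_list[i:i + m] == pattern]
--     segs = [input_list[a:b] for a, b in zip([0] + cuts, cuts + [n])]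
--     return [s for s in segs if s]
-- ===== Notes on version B (the rewrite author's own statement) =====
-- stated objective: alternative
-- what changed: A builds segments element by element with a temp accumulator flushed at each match; B first collects all cut points (one past each match start) in one comprehension and then carves the segments out by slicing between consecutive cut points, dropping an empty tail.
import Mathlib
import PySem

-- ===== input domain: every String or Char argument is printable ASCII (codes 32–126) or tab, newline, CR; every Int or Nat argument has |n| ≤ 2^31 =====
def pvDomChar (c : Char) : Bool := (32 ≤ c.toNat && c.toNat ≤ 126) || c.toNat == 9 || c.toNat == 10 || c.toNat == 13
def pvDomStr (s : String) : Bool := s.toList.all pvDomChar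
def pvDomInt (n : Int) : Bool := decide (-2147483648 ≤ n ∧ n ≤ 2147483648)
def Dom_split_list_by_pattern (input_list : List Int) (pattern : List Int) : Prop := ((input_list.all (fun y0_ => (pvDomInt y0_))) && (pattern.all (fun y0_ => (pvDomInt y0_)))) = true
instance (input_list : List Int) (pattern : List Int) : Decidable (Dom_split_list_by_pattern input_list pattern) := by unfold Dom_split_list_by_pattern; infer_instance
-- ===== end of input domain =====

-- B replaces A's element-by-element accumulator with a two-pass cut-points-then-slices decomposition (alternative; same asymptotic cost).


-- ===== PORT A =====
def split_list_by_pattern (input_list : List Int) (pattern : List Int) : List (List Int) :=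
  let pattern_len : Int := pattern.length
  let st := (PySem.List.pyRange 0 input_list.length 1).foldl
    (fun (st : List (List Int) × List Int) i =>
      let temp := st.2 ++ [PySem.List.pyGetD input_list i 0]
      if PySem.List.slice input_list (some i) (some (i + pattern_len)) == pattern then
        (if temp.isEmpty then st.1 else st.1 ++ [temp], [])
      else
        (st.1, temp))
    ([], [])
  if st.2.isEmpty then st.1 else st.1 ++ [st.2]

-- ===== PORT B =====
def split_list_by_pattern_alt (input_list : List Int) (pattern : List Int) : List (List Int) :=
  let n : Int := input_list.length
  let m : Int := pattern.length
  let cuts := ((PySem.List.pyRange 0 n 1).filter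
      (fun i => PySem.List.slice input_list (some i) (some (i + m)) == pattern)).map (fun i => i + 1)
  let segs := (List.zip (0 :: cuts) (cuts ++ [n])).map
      (fun ab => PySem.List.slice input_list (some ab.1) (some ab.2))
  segs.filter (fun s => !s.isEmpty)

-- ===== PRECONDITION & SPEC =====
def Spec_split_list_by_pattern (input_list : List Int) (pattern : List Int) (out : List (List Int)) : Prop := out = split_list_by_pattern_alt input_list pattern
instance (input_list : List Int) (pattern : List Int) (out : List (List Int)) : Decidable (Spec_split_list_by_pattern input_list pattern out) := by unfold Spec_split_list_by_pattern; infer_instance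

-- ===== CLAIM (what is proved, stated in full; the proofs are below) =====
def Claim_equal_split_list_by_pattern : Prop := ∀ (input_list : List Int) (pattern : List Int), Dom_split_list_by_pattern input_list pattern → Spec_split_list_by_pattern input_list pattern (split_list_by_pattern input_list pattern)

-- ===== LEMMAS AND PROOFS =====

-- cut points strictly below bound k (one past each match start)
def pvCuts (l p : List Int) (k : Int) : List Int :=
  ((PySem.List.pyRange 0 k 1).filter
      (fun i => PySem.List.slice l (some i) (some (i + (p.length : Int))) == p)).map (fun i => i + 1)

-- start of the pending segment
def pvB (l p : List Int) (k : Int) : Int := (pvCuts l p k).getLastD 0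

def pvRes (l p : List Int) (k : Int) : List (List Int) :=
  (List.zip (0 :: pvCuts l p k) (pvCuts l p k)).map
    (fun ab => PySem.List.slice l (some ab.1) (some ab.2))

theorem pvCuts_mem (l p : List Int) (k c : Int) (h : c ∈ pvCuts l p k) : 0 < c ∧ c ≤ k := by
  simp only [pvCuts, List.mem_map, List.mem_filter, PySem.List.mem_pyRange_one] at h
  obtain ⟨i, ⟨⟨hi1, hi2⟩, -⟩, rfl⟩ := h
  omega

theorem pvB_bounds (l p : List Int) (k : Int) (hk : 0 ≤ k) : 0 ≤ pvB l p k ∧ pvB l p k ≤ k := by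
  unfold pvB
  rcases hc : pvCuts l p k with - | ⟨c, cs⟩
  · simp; omega
  · have hmem : (c :: cs).getLastD 0 ∈ c :: cs := by
      simp only [List.getLastD_eq_getLast?, List.getLast?_eq_some_getLast (l := c :: cs) (by simp),
        Option.getD_some]
      exact List.getLast_mem _
    have := pvCuts_mem l p k _ (hc ▸ hmem)
    rw [hc] at this
    omega

theorem pvCuts_succ (l p : List Int) (k : Int) (hk : 0 ≤ k) :
    pvCuts l p (k + 1) = pvCuts l p k ++
      (if PySem.List.slice l (some k) (some (k + (p.length : Int))) == p then [k + 1] else []) := by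
  simp only [pvCuts, PySem.List.pyRange_one_succ_right hk, List.filter_append, List.map_append]
  congr 1
  by_cases h : PySem.List.slice l (some k) (some (k + (p.length : Int))) == p <;>
    simp [List.filter, h]

theorem pvZip_snoc (a z : Int) (cs : List Int) :
    List.zip (a :: cs) (cs ++ [z]) = List.zip (a :: cs) cs ++ [(cs.getLastD a, z)] := by
  induction cs generalizing a with
  | nil => simp
  | cons c cs ih => simp [List.zip_cons_cons, ih c]; cases cs <;> simp [List.getLast?_eq_some_getLast]

theorem pvZip_snoc2 (a w z : Int) (cs : List Int) :
    List.zip (a :: (cs ++ [w])) (cs ++ [z]) = List.zip (a :: cs) cs ++ [(cs.getLastD a, z)] := by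
  induction cs generalizing a with
  | nil => simp
  | cons c cs ih => simp [List.zip_cons_cons, ih c]; cases cs <;> simp [List.getLast?_eq_some_getLast]

theorem pvSlice_snoc (l : List Int) (a : Int) (k : Nat) (ha : 0 ≤ a) (hak : a ≤ (k : Int))
    (hk : k < l.length) :
    PySem.List.slice l (some a) (some (k : Int)) ++ [PySem.List.pyGetD l (k : Int) 0] =
      PySem.List.slice l (some a) (some ((k : Int) + 1)) := by
  obtain ⟨a', rfl⟩ := Int.eq_ofNat_of_zero_le ha
  have hak' : a' ≤ k := by exact_mod_cast hak
  have h1 : ((k : Int) + 1) = ((k + 1 : Nat) : Int) := by push_cast; ring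
  rw [h1, PySem.List.slice_natCast, PySem.List.slice_natCast, PySem.List.pyGetD_natCast]
  have h2 : k + 1 - a' = (k - a') + 1 := by omega
  have h3 : k - a' < (l.drop a').length := by simp; omega
  rw [h2, List.take_add_one, List.getElem?_eq_getElem h3]
  have h4 : a' + (k - a') = k := by omega
  simp [List.getElem_drop, List.getD, h4, List.getElem?_eq_getElem hk]


theorem pvInvariant (l p : List Int) (k : Nat) (hk : k ≤ l.length) :
    ((PySem.List.pyRange 0 (k : Int) 1).foldl
      (fun (st : List (List Int) × List Int) i =>
        let temp := st.2 ++ [PySem.List.pyGetD l i 0]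
        if PySem.List.slice l (some i) (some (i + (p.length : Int))) == p then
          (if temp.isEmpty then st.1 else st.1 ++ [temp], [])
        else
          (st.1, temp))
      ([], []) =
      (pvRes l p k, PySem.List.slice l (some (pvB l p k)) (some (k : Int)))) ∧
    (∀ s ∈ pvRes l p k, s ≠ []) := by
  induction k with
  | zero =>
    constructor
    · have h0 : PySem.List.slice l none (some (0 : Int)) = [] := by
        simp [PySem.List.slice]
      simp [pvRes, pvCuts, pvB, PySem.List.pyRange_one_eq_nil (le_refl 0),
        PySem.List.slice_zero_start, h0]
    · simp [pvRes, pvCuts, PySem.List.pyRange_one_eq_nil (le_refl 0)]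
  | succ k ih =>
    have hk' : k ≤ l.length := by omega
    have hklt : k < l.length := by omega
    obtain ⟨hfold, hne⟩ := ih hk'
    have hB := pvB_bounds l p (k : Int) (Int.natCast_nonneg k)
    have hsnoc := pvSlice_snoc l (pvB l p (k : Int)) k hB.1 hB.2 hklt
    have hcast : ((k + 1 : Nat) : Int) = (k : Int) + 1 := by push_cast; ring
    rw [hcast, PySem.List.pyRange_one_succ_right (Int.natCast_nonneg k), List.foldl_append,
      hfold]
    simp only [List.foldl_cons, List.foldl_nil]
    have hcs := pvCuts_succ l p (k : Int) (Int.natCast_nonneg k)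
    by_cases hm : (PySem.List.slice l (some (k : Int)) (some ((k : Int) + (p.length : Int))) == p) = true
    · rw [if_pos hm] at hcs
      have htne : PySem.List.slice l (some (pvB l p (k : Int))) (some ((k : Int) + 1)) ≠ [] := by
        rw [← hsnoc]; simp
      have hres : pvRes l p ((k : Int) + 1) =
          pvRes l p (k : Int) ++
            [PySem.List.slice l (some (pvB l p (k : Int))) (some ((k : Int) + 1))] := by
        unfold pvRes
        rw [hcs]
        rw [pvZip_snoc2 0 ((k : Int) + 1) ((k : Int) + 1)]
        simp [pvB]
      have hBnew : pvB l p ((k : Int) + 1) = (k : Int) + 1 := by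
        unfold pvB; rw [hcs]; simp
      constructor
      · simp only [hm, if_pos, hsnoc, hres, hBnew]
        have hempty : PySem.List.slice l (some ((k : Int) + 1)) (some ((k : Int) + 1)) = [] := by
          have hlen : (PySem.List.slice l (some ((k : Int) + 1)) (some ((k : Int) + 1))).length = 0 := by
            rw [PySem.List.length_slice]; omega
          exact List.eq_nil_of_length_eq_zero hlen
        simp [hempty, htne, List.isEmpty_iff]
      · intro s hs
        rw [hres] at hs
        rcases List.mem_append.mp hs with h | h
        · exact hne s h
        · simp at h; subst h; exact htne
    · rw [if_neg hm] at hcs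
      simp only [List.append_nil] at hcs
      have hcuts_eq : pvCuts l p ((k : Int) + 1) = pvCuts l p (k : Int) := hcs
      have hres : pvRes l p ((k : Int) + 1) = pvRes l p (k : Int) := by
        unfold pvRes; rw [hcuts_eq]
      have hBnew : pvB l p ((k : Int) + 1) = pvB l p (k : Int) := by
        unfold pvB; rw [hcuts_eq]
      constructor
      · simp only [hm, if_neg, Bool.not_eq_true, hres, hBnew, hsnoc]
      · rw [hres]; exact hne

-- ===== VERDICT (by name: the statement is the Claim_ definition above) =====
theorem split_list_by_pattern_spec : Claim_equal_split_list_by_pattern := by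
  intro l p _
  unfold Spec_split_list_by_pattern
  obtain ⟨hfold, hne⟩ := pvInvariant l p l.length le_rfl
  have hA : split_list_by_pattern l p =
      (if (PySem.List.slice l (some (pvB l p (l.length : Int)))
            (some (l.length : Int))).isEmpty then pvRes l p (l.length : Int)
       else pvRes l p (l.length : Int) ++
         [PySem.List.slice l (some (pvB l p (l.length : Int))) (some (l.length : Int))]) := by
    unfold split_list_by_pattern
    dsimp only
    rw [hfold]
  have hB : split_list_by_pattern_alt l p =
      (pvRes l p (l.length : Int) ++
        [PySem.List.slice l (some (pvB l p (l.length : Int))) (some (l.length : Int))]).filter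
        (fun s => !s.isEmpty) := by
    unfold split_list_by_pattern_alt pvRes pvB pvCuts
    dsimp only
    rw [pvZip_snoc 0 (l.length : Int)]
    simp
  rw [hA, hB, List.filter_append]
  rw [List.filter_eq_self.mpr (fun s hs => by simp [hne s hs])]
  cases hT : (PySem.List.slice l (some (pvB l p (l.length : Int)))
      (some (l.length : Int))).isEmpty <;> simp [List.filter, hT]
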